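-- pv_equiv track=rewrite | github.com/lukassw1/different-algorithms-and-data-structures | heap_structure/main.py | print_cheap
-- ===== SOURCE A (Python) =====
-- def print_cheap(cheap, n):
--     str1 = f'Kopiec {n}-krotny:\n'
--     index = 0
--     in_row = 0
--     row = 0
--     while index < len(cheap):
--         if in_row + 1 == pow(n, row):
--             str1 += str(cheap[index]) + "\n"
--             row += 1
--             in_row = 0
--         else:
--             in_row += 1
--             str1 += str(cheap[index]) + " "
--             if in_row % n == 0:
--                 str1 += '| '
--         index += 1
--     return str1
-- ===== SOURCE B (Python) =====
-- def print_cheap(cheap, n):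
--     if n < 1:
--         raise ValueError("heap arity must be a positive integer")
--     parts = [f'Kopiec {n}-krotny:\n']
--     i = 0
--     row = 0
--     while i < len(cheap):
--         size = n ** row
--         chunk = cheap[i:i + size]
--         full = len(chunk) == size
--         for p, val in enumerate(chunk):
--             if full and p == size - 1:
--                 parts.append(str(val) + '\n')
--             else:
--                 parts.append(str(val) + ' ')
--                 if (p + 1) % n == 0:
--                     parts.append('| ')
--         i += size
--         row += 1
--     return ''.join(parts)
-- ===== Notes on version B (the rewrite author's own statement) =====
-- stated objective: alternative
-- what changed: Replaces A's flat state-machine while-loop (index/in_row/row counters deciding newline vs separator element by element) with a two-phase decomposition: slice the array into row chunks of size n**row, then format each chunk by position.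
-- outside the precondition, e.g. on print_cheap([5], 0): A returns 'Kopiec 0-krotny:\n5\n', B raises ValueError; on print_cheap([1, 2, 3], -2): A returns 'Kopiec -2-krotny:\n1\n2 3 | ', B raises ValueError; on print_cheap([1, 2], 0): A raises ZeroDivisionError, B raises ValueError
import Mathlib
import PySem

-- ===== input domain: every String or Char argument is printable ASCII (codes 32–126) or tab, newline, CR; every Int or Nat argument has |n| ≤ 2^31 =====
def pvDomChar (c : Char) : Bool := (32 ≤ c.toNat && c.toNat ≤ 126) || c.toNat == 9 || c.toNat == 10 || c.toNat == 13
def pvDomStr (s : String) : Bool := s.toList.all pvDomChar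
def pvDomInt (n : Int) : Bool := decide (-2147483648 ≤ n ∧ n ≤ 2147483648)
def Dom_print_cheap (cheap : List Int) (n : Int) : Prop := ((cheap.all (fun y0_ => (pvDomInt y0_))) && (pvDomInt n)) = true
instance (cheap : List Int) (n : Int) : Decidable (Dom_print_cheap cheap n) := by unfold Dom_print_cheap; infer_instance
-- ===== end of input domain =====

-- B replaces A's flat state-machine loop (index/in_row/row counters) by a two-phase
-- decomposition: slice the array into rows of size n^row, then format each row chunk.
-- Objective: alternative decomposition (same asymptotic cost).

-- ===== PORT A =====
-- A's `while index < len(cheap)` only reads cheap[index] and increments index; it is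
-- transliterated as the obvious structural recursion on the remaining suffix, with the
-- same state (in_row, row, accumulated string).
def printCheapLoopA (n : Int) (rest : List Int) (in_row : Int) (row : Nat) (acc : String) : String :=
  match rest with
  | [] => acc
  | v :: tl =>
    if in_row + 1 = n ^ row then
      printCheapLoopA n tl 0 (row + 1) (acc ++ PySem.Int.toStr v ++ "\n")
    else
      let ir := in_row + 1
      printCheapLoopA n tl ir row
        (acc ++ PySem.Int.toStr v ++ " " ++ (if PySem.Int.mod ir n = 0 then "| " else ""))

def print_cheap (cheap : List Int) (n : Int) : String :=
  printCheapLoopA n cheap 0 0 ("Kopiec " ++ PySem.Int.toStr n ++ "-krotny:\n")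

-- ===== PORT B =====
-- B's inner `for p, val in enumerate(chunk)` accumulating into s.
def pvFmtRow (n : Int) (chunk : List Int) (p : Nat) (size : Nat) (full : Bool) : String :=
  match chunk with
  | [] => ""
  | v :: tl =>
    (if full && decide (p = size - 1) then
       PySem.Int.toStr v ++ "\n"
     else
       PySem.Int.toStr v ++ " " ++ (if PySem.Int.mod ((p : Int) + 1) n = 0 then "| " else ""))
    ++ pvFmtRow n tl (p + 1) size full

-- B's outer `while i < len(cheap)` advancing i by size: recursion on the suffix.
def pvBLoop (n : Int) (hn : 1 ≤ n) (rest : List Int) (row : Nat) (acc : String) : String :=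
  if h : rest = [] then acc
  else
    let size := n.toNat ^ row
    let chunk := rest.take size
    pvBLoop n hn (rest.drop size) (row + 1)
      (acc ++ pvFmtRow n chunk 0 size (decide (chunk.length = size)))
  termination_by rest.length
  decreasing_by
    simp only [List.length_drop]
    have h1 : 1 ≤ n.toNat ^ row := Nat.one_le_pow _ _ (by omega)
    have h2 : rest.length ≠ 0 := fun hh => h (List.length_eq_zero_iff.mp hh)
    omega

def print_cheap_alt (cheap : List Int) (n : Int) : String :=
  if h : n < 1 then ""   -- Python B raises ValueError here (outside Pre_)
  else pvBLoop n (by omega) cheap 0 ("Kopiec " ++ PySem.Int.toStr n ++ "-krotny:\n")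

-- ===== PRECONDITION & SPEC =====
-- Pre_ excludes n ≤ 0: a heap arity must be positive; A raises ZeroDivisionError for
-- n = 0 on lists of length ≥ 2, and on the remaining n ≤ 0 inputs A's returned string
-- is a degenerate artefact of its counters while B raises ValueError.
def Pre_print_cheap (cheap : List Int) (n : Int) : Prop := 1 ≤ n
instance (cheap : List Int) (n : Int) : Decidable (Pre_print_cheap cheap n) := by
  unfold Pre_print_cheap; infer_instance
def pvWitness_print_cheap : List Int × Int := ([3, 1, 4, 1, 5, 9, 2], 2)

def Spec_print_cheap (cheap : List Int) (n : Int) (out : String) : Prop := out = print_cheap_alt cheap n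
instance (cheap : List Int) (n : Int) (out : String) : Decidable (Spec_print_cheap cheap n out) := by unfold Spec_print_cheap; infer_instance

-- ===== CLAIM (what is proved, stated in full; the proofs are below) =====
def Claim_equal_print_cheap : Prop := ∀ (cheap : List Int) (n : Int), Dom_print_cheap cheap n → Pre_print_cheap cheap n → Spec_print_cheap cheap n (print_cheap cheap n)

-- ===== LEMMAS AND PROOFS =====

theorem pv_pow_cast (n : Int) (hn : 1 ≤ n) (row : Nat) :
    (n ^ row : Int) = ((n.toNat ^ row : Nat) : Int) := by
  have : ((n.toNat : Int)) = n := Int.toNat_of_nonneg (by omega)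
  push_cast [this]
  rfl

-- mid-row: A's flat loop from state (in_row = j) equals formatting B's remaining chunk
-- and continuing at the next row boundary.
theorem pv_inner (n : Int) (hn : 1 ≤ n) (row : Nat) :
    ∀ (rest : List Int) (j : Nat) (acc : String), j < n.toNat ^ row →
      printCheapLoopA n rest (j : Int) row acc =
        printCheapLoopA n (rest.drop (n.toNat ^ row - j)) 0 (row + 1)
          (acc ++ pvFmtRow n (rest.take (n.toNat ^ row - j)) j (n.toNat ^ row)
            (decide (n.toNat ^ row - j ≤ rest.length))) := by
  intro rest
  induction rest with
  | nil =>
    intro j acc hj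
    simp [printCheapLoopA, pvFmtRow]
  | cons v tl ih =>
    intro j acc hj
    set size := n.toNat ^ row with hsize
    have hcond : ((j : Int) + 1 = n ^ row) ↔ (j + 1 = size) := by
      rw [pv_pow_cast n hn row, ← hsize]
      omega
    by_cases hfull : j + 1 = size
    · -- this element completes the row
      have hs1 : size - j = 1 := by omega
      rw [printCheapLoopA]
      simp only [hcond.mpr hfull, hs1]
      simp only [List.take_succ_cons, List.take_zero, List.drop_succ_cons, List.drop_zero]
      rw [pvFmtRow]
      have hp : j = size - 1 := by omega
      simp [pvFmtRow, hp, String.append_assoc]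
    · -- mid-row element
      have hlt : j + 1 < size := by omega
      rw [printCheapLoopA]
      rw [if_neg (by rw [hcond]; omega)]
      have hj1 : ((j : Int) + 1) = ((j + 1 : Nat) : Int) := by push_cast; ring
      have hsj : size - j = (size - (j + 1)) + 1 := by omega
      rw [hsj]
      simp only [List.take_succ_cons, List.drop_succ_cons, List.length_cons]
      rw [pvFmtRow]
      have hiff : (size - (j + 1) + 1 ≤ tl.length + 1) ↔ (size - (j + 1) ≤ tl.length) := by omega
      have hhead : ¬ (j = size - 1) := by omega
      rw [hj1, ih (j + 1) _ hlt]
      simp [hhead, hiff, String.append_assoc]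

-- row-boundary states: A's loop equals B's outer loop.
theorem pv_outer (n : Int) (hn : 1 ≤ n) :
    ∀ (L : Nat) (rest : List Int), rest.length ≤ L → ∀ (row : Nat) (acc : String),
      printCheapLoopA n rest 0 row acc = pvBLoop n hn rest row acc := by
  intro L
  induction L with
  | zero =>
    intro rest hlen row acc
    have : rest = [] := List.length_eq_zero_iff.mp (by omega)
    subst this
    rw [pvBLoop]
    simp [printCheapLoopA]
  | succ L ih =>
    intro rest hlen row acc
    by_cases hrest : rest = []
    · subst hrest
      rw [pvBLoop]
      simp [printCheapLoopA]
    · set size := n.toNat ^ row with hsize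
      have hpos : 1 ≤ size := Nat.one_le_pow _ _ (by omega)
      have h0 : (0 : Int) = ((0 : Nat) : Int) := rfl
      rw [h0, pv_inner n hn row rest 0 acc (by omega)]
      rw [pvBLoop]
      simp only [hrest, dif_neg, not_false_iff, ← hsize, Nat.sub_zero]
      have hne : rest.length ≠ 0 := fun hh => hrest (List.length_eq_zero_iff.mp hh)
      have hdrop : (rest.drop size).length ≤ L := by
        simp only [List.length_drop]; omega
      rw [ih (rest.drop size) hdrop]
      have hflag : (decide (size ≤ rest.length) : Bool) =
          (decide ((rest.take size).length = size) : Bool) := by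
        simp only [List.length_take]
        rcases Nat.le_total size rest.length with h | h
        · simp [h]
        · by_cases he : size = rest.length
          · simp [he]
          · have : ¬ (size ≤ rest.length) := by omega
            simp [Nat.min_eq_right h, this]; omega
      rw [hflag]

-- ===== VERDICT (by name: the statement is the Claim_ definition above) =====
theorem print_cheap_spec : Claim_equal_print_cheap := by
  intro cheap n _hdom hpre
  unfold Spec_print_cheap print_cheap print_cheap_alt
  have hn : 1 ≤ n := hpre
  rw [dif_neg (by omega)]
  exact pv_outer n hn cheap.length cheap le_rfl 0 _
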